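-- pv_equiv track=rewrite | github.com/runnz121/for_coding_test | test1toss.py | solution
-- ===== SOURCE A (Python) =====
-- def solution(servers, sticky, requests):
--     answer = [[] for _ in range(servers)]
--
--
--     for i in range(len(requests)):
--         flag = False
--         if sticky == False:
--             answer[i % servers].append(requests[i])
--         else:
--             for k in range(servers):
--                 if requests[i] in answer[k]:
--                     answer[k].append(requests[i])
--                     flag = True
--                     break
--             if flag == False:
--                 answer[i % servers].append(requests[i])
--     return answer
-- ===== SOURCE B (Python) =====
-- def solution(servers, sticky, requests):
--     if sticky == False:
--         # closed-form round-robin: each server r gets the requests whose index is r mod servers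
--         return [[v for i, v in enumerate(requests) if i % servers == r]
--                 for r in range(servers)]
--     # sticky: one pass builds the server table (first occurrence decides), then per-server filters
--     server_of = {}
--     for i, v in enumerate(requests):
--         if v not in server_of:
--             server_of[v] = i % servers
--     return [[v for v in requests if server_of[v] == r] for r in range(servers)]
-- ===== Notes on version B (the rewrite author's own statement) =====
-- stated objective: alternative
-- what changed: A appends each request into mutable buckets one at a time, with an inner scan over all servers to find the sticky bucket; B instead computes each server's list directly by a per-server filter comprehension, with the sticky target precomputed in one dict-building pass (first occurrence decides), removing the inner membership scan.
import Mathlib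
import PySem

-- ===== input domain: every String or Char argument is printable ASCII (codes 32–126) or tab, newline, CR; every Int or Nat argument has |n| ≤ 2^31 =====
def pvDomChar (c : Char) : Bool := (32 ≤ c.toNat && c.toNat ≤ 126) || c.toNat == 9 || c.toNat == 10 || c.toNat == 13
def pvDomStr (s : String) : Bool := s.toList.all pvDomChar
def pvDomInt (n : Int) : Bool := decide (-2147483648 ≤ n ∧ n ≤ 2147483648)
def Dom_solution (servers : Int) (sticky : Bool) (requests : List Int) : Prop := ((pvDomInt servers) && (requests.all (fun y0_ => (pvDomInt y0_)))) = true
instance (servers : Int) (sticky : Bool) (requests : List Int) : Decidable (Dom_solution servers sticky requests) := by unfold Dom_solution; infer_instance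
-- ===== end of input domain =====

-- B distributes by per-server filters (round-robin by index class; sticky via a first-occurrence
-- dict table) instead of A's per-request append loop with an inner scan over servers: alternative
-- decomposition (one pass per server rather than one pass overall; not claimed faster).

-- ===== PORT A =====
-- answer[j].append(v) on a list of buckets, Python nonnegative index j
def pvAppendAt : List (List Int) → Int → Int → List (List Int)
  | [], _, _ => []
  | l :: ls, j, v => if j = 0 then (l ++ [v]) :: ls else l :: pvAppendAt ls (j - 1) v

-- A's inner loop: 'for k in range(servers): if v in answer[k]: answer[k].append(v); break'
-- (answer has exactly servers buckets, so scanning the bucket list is that loop; none ↔ no hit)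
def pvScanAppend : List (List Int) → Int → Option (List (List Int))
  | [], _ => none
  | l :: ls, v => if v ∈ l then some ((l ++ [v]) :: ls)
                  else (pvScanAppend ls v).map (l :: ·)

def solution (servers : Int) (sticky : Bool) (requests : List Int) : List (List Int) :=
  (PySem.List.enumerate requests 0).foldl
    (fun answer iv =>
      if sticky == false then
        pvAppendAt answer (PySem.Int.mod iv.1 servers) iv.2
      else
        match pvScanAppend answer iv.2 with
        | some a => a
        | none => pvAppendAt answer (PySem.Int.mod iv.1 servers) iv.2)
    ((PySem.List.pyRange 0 servers 1).map (fun _ => ([] : List Int)))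

-- ===== PORT B =====
def solution_alt (servers : Int) (sticky : Bool) (requests : List Int) : List (List Int) :=
  if sticky == false then
    (PySem.List.pyRange 0 servers 1).map (fun r =>
      ((PySem.List.enumerate requests 0).filter
        (fun iv => PySem.Int.mod iv.1 servers == r)).map (·.2))
  else
    let serverOf : PySem.Dict Int Int :=
      (PySem.List.enumerate requests 0).foldl
        (fun d iv => if d.contains iv.2 then d else d.insert iv.2 (PySem.Int.mod iv.1 servers))
        PySem.Dict.empty
    (PySem.List.pyRange 0 servers 1).map (fun r =>
      requests.filter (fun v => serverOf.getD v 0 == r))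

-- ===== PRECONDITION & SPEC =====
-- Pre_ excludes inputs where Python A raises: servers ≤ 0 with a nonempty request list
-- (ZeroDivisionError on i % 0, IndexError on indexing the empty bucket list).
def Pre_solution (servers : Int) (sticky : Bool) (requests : List Int) : Prop :=
  1 ≤ servers ∨ requests = []
instance (servers : Int) (sticky : Bool) (requests : List Int) : Decidable (Pre_solution servers sticky requests) := by unfold Pre_solution; infer_instance

def pvWitness_solution : Int × Bool × List Int := (3, true, [5, 7, 5, 2, 7, 5])

def Spec_solution (servers : Int) (sticky : Bool) (requests : List Int) (out : List (List Int)) : Prop := out = solution_alt servers sticky requests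
instance (servers : Int) (sticky : Bool) (requests : List Int) (out : List (List Int)) : Decidable (Spec_solution servers sticky requests out) := by unfold Spec_solution; infer_instance

-- ===== CLAIM (what is proved, stated in full; the proofs are below) =====
def Claim_equal_solution : Prop := ∀ (servers : Int) (sticky : Bool) (requests : List Int), Dom_solution servers sticky requests → Pre_solution servers sticky requests → Spec_solution servers sticky requests (solution servers sticky requests)

-- ===== LEMMAS AND PROOFS =====

-- canonical form: bucket r holds (in order) the second components of the pairs with target r
def pvFill (N : Nat) (t : Int × Int → Nat) (l : List (Int × Int)) : List (List Int) :=
  (List.range N).map (fun r => (l.filter (fun p => t p == r)).map (·.2))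

theorem pvFill_length (N t l) : (pvFill N t l).length = N := by
  simp [pvFill]

theorem pvFill_getElem (N t l) (r : Nat) (hr : r < N) :
    (pvFill N t l)[r]'(by simpa [pvFill] using hr) =
      (l.filter (fun p => t p == r)).map (·.2) := by
  simp [pvFill]

theorem pvAppendAt_eq_set (xs : List (List Int)) (j : Nat) (hj : j < xs.length) (v : Int) :
    pvAppendAt xs (j : Int) v = xs.set j (xs[j] ++ [v]) := by
  induction xs generalizing j with
  | nil => simp at hj
  | cons l ls ih =>
    cases j with
    | zero => simp [pvAppendAt]
    | succ j =>
      have : ((j + 1 : Nat) : Int) ≠ 0 := by omega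
      simp only [pvAppendAt, this, if_neg]
      have h1 : ((j + 1 : Nat) : Int) - 1 = (j : Int) := by omega
      rw [h1, ih j (by simpa using hj)]
      simp

theorem pvFill_snoc (N t l p) (hp : t p < N) :
    pvFill N t (l ++ [p]) =
      (pvFill N t l).set (t p) ((pvFill N t l)[t p]'(by simpa [pvFill_length] using hp) ++ [p.2]) := by
  apply List.ext_getElem
  · simp [pvFill_length]
  · intro r h1 h2
    have hrN : r < N := by simpa [pvFill_length] using h1
    rw [List.getElem_set]
    by_cases hr : t p = r
    · subst hr
      simp only [if_pos rfl]
      rw [pvFill_getElem _ _ _ _ hrN, pvFill_getElem _ _ _ _ hrN]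
      simp [List.filter_append]
    · rw [if_neg hr, pvFill_getElem _ _ _ _ hrN, pvFill_getElem _ _ _ _ hrN]
      simp [List.filter_append, hr]

theorem pvScanAppend_none (xs : List (List Int)) (v : Int) (h : ∀ l ∈ xs, v ∉ l) :
    pvScanAppend xs v = none := by
  induction xs with
  | nil => rfl
  | cons l ls ih =>
    simp only [pvScanAppend, if_neg (h l (by simp))]
    rw [ih (fun l' hl' => h l' (by simp [hl']))]
    rfl

theorem pvScanAppend_unique (xs : List (List Int)) (v : Int) (j : Nat) (hj : j < xs.length)
    (hv : v ∈ xs[j]) (huniq : ∀ k (hk : k < xs.length), v ∈ xs[k] → k = j) :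
    pvScanAppend xs v = some (xs.set j (xs[j] ++ [v])) := by
  induction xs generalizing j with
  | nil => simp at hj
  | cons l ls ih =>
    cases j with
    | zero =>
      simp only [List.getElem_cons_zero] at hv
      simp [pvScanAppend, hv]
    | succ j =>
      have hl : v ∉ l := by
        intro hvl
        have := huniq 0 (by simp) (by simpa using hvl)
        omega
      simp only [pvScanAppend, if_neg hl]
      rw [ih j (by simpa using hj) (by simpa using hv)
        (fun k hk hvk => by
          have := huniq (k + 1) (by simpa using hk) (by simpa using hvk)
          omega)]
      simp

-- elements of a pvFill bucket come from the pairs, with matching target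
theorem pvFill_mem (N t l) (r : Nat) (hr : r < N) (v : Int)
    (hv : v ∈ (pvFill N t l)[r]'(by simpa [pvFill_length] using hr)) :
    ∃ p ∈ l, p.2 = v ∧ t p = r := by
  rw [pvFill_getElem _ _ _ _ hr] at hv
  simp only [List.mem_map, List.mem_filter] at hv
  obtain ⟨p, ⟨hpl, hpt⟩, hpv⟩ := hv
  exact ⟨p, hpl, hpv, by simpa using hpt⟩

-- generic loop invariant: if each step turns pvFill(pre) into pvFill(pre ++ [p]),
-- the whole fold over the enumeration is pvFill of it
theorem pvFold_fill (N : Nat) (t : Int × Int → Nat) (step : List (List Int) → Int × Int → List (List Int))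
    (full : List (Int × Int))
    (hstep : ∀ pre p suf, full = pre ++ p :: suf → step (pvFill N t pre) p = pvFill N t (pre ++ [p])) :
    ∀ pre suf, full = pre ++ suf → suf.foldl step (pvFill N t pre) = pvFill N t full := by
  intro pre suf
  induction suf generalizing pre with
  | nil => intro h; simp [h]
  | cons p suf ih =>
    intro h
    simp only [List.foldl_cons]
    rw [hstep pre p suf h, ih (pre ++ [p]) (by simp [h])]




-- target functions (proof-only): where request p goes
def pvTargetNS (servers : Int) (p : Int × Int) : Nat := (PySem.Int.mod p.1 servers).toNat
def pvTargetS (servers : Int) (requests : List Int) (p : Int × Int) : Nat :=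
  (PySem.Int.mod ((requests.idxOf p.2 : Nat) : Int) servers).toNat

theorem pvMod_toNat_lt (servers i : Int) (hs : 1 ≤ servers) :
    (PySem.Int.mod i servers).toNat < servers.toNat := by
  have h1 := PySem.Int.mod_lt i (b := servers) (by omega)
  have h2 := PySem.Int.mod_nonneg i (b := servers) (by omega)
  omega

theorem pvMod_cast (servers i : Int) (hs : 1 ≤ servers) (hi : 0 ≤ i) :
    ((PySem.Int.mod i servers).toNat : Int) = PySem.Int.mod i servers :=
  Int.toNat_of_nonneg (PySem.Int.mod_nonneg i (by omega))

theorem pvIdxOf_first (l : List Int) (n : Nat) (v : Int) (h : n < l.length)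
    (h1 : l[n] = v) (h2 : v ∉ l.take n) : l.idxOf v = n := by
  conv_lhs => rw [← List.take_append_drop n l, List.drop_eq_getElem_cons h, h1]
  rw [List.idxOf_append]
  simp [h2, Nat.min_eq_left (le_of_lt h)]

-- facts about a split of the enumeration
theorem pvEnum_split (requests : List Int) (pre suf : List (Int × Int)) (p : Int × Int)
    (h : PySem.List.enumerate requests 0 = pre ++ p :: suf) :
    ∃ (hn : pre.length < requests.length),
      p.1 = (pre.length : Int) ∧ p.2 = requests[pre.length] ∧
      pre.map (·.2) = requests.take pre.length := by
  have hlen : requests.length = pre.length + suf.length + 1 := by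
    have := PySem.List.length_enumerate requests 0
    rw [h] at this; simp at this; omega
  have hn : pre.length < requests.length := by omega
  have hne : pre.length < (PySem.List.enumerate requests 0).length := by
    rw [PySem.List.length_enumerate]; exact hn
  have hp : (PySem.List.enumerate requests 0)[pre.length]'hne = p := by
    rw [List.getElem_of_eq h hne]; simp
  rw [PySem.List.getElem_enumerate] at hp
  refine ⟨hn, ?_, ?_, ?_⟩
  · rw [← hp]; simp
  · rw [← hp]
  · apply List.ext_getElem
    · simp [Nat.min_eq_left (le_of_lt hn)]
    · intro k hk1 hk2
      have hk : k < pre.length := by simpa using hk1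
      have hke : k < (PySem.List.enumerate requests 0).length := by
        rw [PySem.List.length_enumerate]; omega
      have : (PySem.List.enumerate requests 0)[k]'hke = pre[k]'hk := by
        rw [List.getElem_of_eq h hke]; exact List.getElem_append_left hk
      rw [PySem.List.getElem_enumerate] at this
      simp only [List.getElem_map, List.getElem_take]
      rw [← this]

-- every index in the enumeration is nonnegative
theorem pvEnum_fst_nonneg (requests : List Int) (p : Int × Int)
    (hp : p ∈ PySem.List.enumerate requests 0) : 0 ≤ p.1 := by
  rw [PySem.List.mem_enumerate_iff] at hp
  obtain ⟨k, hk, rfl⟩ := hp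
  simp

theorem pvInit_eq (servers : Int) (t : Int × Int → Nat) :
    (PySem.List.pyRange 0 servers 1).map (fun _ => ([] : List Int)) =
      pvFill servers.toNat t [] := by
  rw [PySem.List.pyRange_one]
  simp [pvFill, List.map_map, Function.comp_def, List.map_const']

-- A's non-sticky step advances the canonical form
theorem pvStepNS (servers : Int) (hs : 1 ≤ servers) (requests : List Int)
    (pre suf : List (Int × Int)) (p : Int × Int)
    (h : PySem.List.enumerate requests 0 = pre ++ p :: suf) :
    pvAppendAt (pvFill servers.toNat (pvTargetNS servers) pre) (PySem.Int.mod p.1 servers) p.2 =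
      pvFill servers.toNat (pvTargetNS servers) (pre ++ [p]) := by
  obtain ⟨hn, hp1, hp2, hmap⟩ := pvEnum_split requests pre suf p h
  have h0 : 0 ≤ p.1 := by rw [hp1]; simp
  have hlt : pvTargetNS servers p < servers.toNat := pvMod_toNat_lt servers p.1 hs
  rw [← pvMod_cast servers p.1 hs h0]
  rw [pvAppendAt_eq_set _ _ (by rw [pvFill_length]; exact hlt)]
  rw [pvFill_snoc _ _ _ _ hlt]
  rfl

-- A's sticky step advances the canonical form
theorem pvStepS (servers : Int) (hs : 1 ≤ servers) (requests : List Int)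
    (pre suf : List (Int × Int)) (p : Int × Int)
    (h : PySem.List.enumerate requests 0 = pre ++ p :: suf) :
    (match pvScanAppend (pvFill servers.toNat (pvTargetS servers requests) pre) p.2 with
      | some a => a
      | none => pvAppendAt (pvFill servers.toNat (pvTargetS servers requests) pre)
          (PySem.Int.mod p.1 servers) p.2) =
      pvFill servers.toNat (pvTargetS servers requests) (pre ++ [p]) := by
  obtain ⟨hn, hp1, hp2, hmap⟩ := pvEnum_split requests pre suf p h
  have hlt : pvTargetS servers requests p < servers.toNat :=
    pvMod_toNat_lt servers _ hs
  by_cases hv : p.2 ∈ pre.map (·.2)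
  · -- p.2 already placed: the scan hits exactly bucket (pvTargetS p)
    obtain ⟨p', hp', hp'2⟩ := List.mem_map.1 hv
    have htp : pvTargetS servers requests p' = pvTargetS servers requests p := by
      simp [pvTargetS, hp'2]
    have hmem : p.2 ∈ (pvFill servers.toNat (pvTargetS servers requests) pre)[pvTargetS servers requests p]'(by rw [pvFill_length]; exact hlt) := by
      rw [pvFill_getElem _ _ _ _ hlt]
      exact List.mem_map.2 ⟨p', List.mem_filter.2 ⟨hp', by simp [htp]⟩, hp'2⟩
    rw [pvScanAppend_unique _ _ (pvTargetS servers requests p)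
      (by rw [pvFill_length]; exact hlt) hmem
      (fun k hk hvk => by
        have hkN : k < servers.toNat := by rwa [pvFill_length] at hk
        obtain ⟨q, hq, hq2, hqt⟩ := pvFill_mem servers.toNat _ pre k hkN p.2 hvk
        rw [← hqt]; simp [pvTargetS, hq2])]
    rw [pvFill_snoc _ _ _ _ hlt]
  · -- first occurrence: scan misses, append at i % servers
    rw [pvScanAppend_none _ _ (fun l hl hvl => by
      obtain ⟨r, hr, hrl⟩ := List.mem_iff_getElem.1 hl
      have hrN : r < servers.toNat := by rwa [pvFill_length] at hr
      obtain ⟨q, hq, hq2, -⟩ := pvFill_mem servers.toNat _ pre r hrN p.2 (by rw [hrl]; exact hvl)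
      exact hv (List.mem_map.2 ⟨q, hq, hq2⟩))]
    have hidx : requests.idxOf p.2 = pre.length := by
      apply pvIdxOf_first requests pre.length p.2 hn hp2.symm
      rwa [← hmap]
    have hts : pvTargetS servers requests p = (PySem.Int.mod p.1 servers).toNat := by
      simp [pvTargetS, hidx, hp1]
    have h0 : 0 ≤ p.1 := by rw [hp1]; simp
    rw [← pvMod_cast servers p.1 hs h0, ← hts]
    rw [pvAppendAt_eq_set _ _ (by rw [pvFill_length]; exact hlt)]
    rw [pvFill_snoc _ _ _ _ hlt]

-- the dict built by B's first sticky pass: first-occurrence index  i % servers, per value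
theorem pvServerOf_inv (servers : Int) (requests : List Int) :
    ∀ (suf pre : List (Int × Int)) (d : PySem.Dict Int Int),
      PySem.List.enumerate requests 0 = pre ++ suf →
      (∀ v : Int, d.get? v = if v ∈ pre.map (·.2)
        then some (PySem.Int.mod ((requests.idxOf v : Nat) : Int) servers) else none) →
      ∀ v : Int,
        (suf.foldl (fun d iv => if d.contains iv.2 then d
            else d.insert iv.2 (PySem.Int.mod iv.1 servers)) d).get? v =
          if v ∈ (pre ++ suf).map (·.2)
            then some (PySem.Int.mod ((requests.idxOf v : Nat) : Int) servers) else none := by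
  intro suf
  induction suf with
  | nil => intro pre d h hd v; simp only [List.foldl_nil, List.append_nil]; exact hd v
  | cons p suf ih =>
    intro pre d h hd v
    simp only [List.foldl_cons]
    have hassoc : pre ++ p :: suf = (pre ++ [p]) ++ suf := by simp
    by_cases hv : p.2 ∈ pre.map (·.2)
    · have hc : d.contains p.2 = true := by
        rw [PySem.Dict.contains_eq_isSome_get?, hd p.2, if_pos hv]; rfl
      rw [if_pos hc]
      rw [hassoc]
      apply ih (pre ++ [p]) d (by rw [hassoc] at h; exact h)
      intro w
      rw [hd w]
      by_cases hw : w = p.2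
      · subst hw; simp [hv]
      · simp only [List.map_append, List.mem_append]
        have hiff : (w ∈ List.map (fun x => x.2) pre ∨ w ∈ List.map (fun x => x.2) [p]) ↔ w ∈ List.map (fun x => x.2) pre := by
          simp [hw]
        rw [if_congr hiff rfl rfl]
    · have hc : d.contains p.2 = false := by
        rw [PySem.Dict.contains_eq_isSome_get?, hd p.2, if_neg hv]; rfl
      rw [hc]
      simp only [Bool.false_eq_true, if_false]
      rw [hassoc]
      obtain ⟨hn, hp1, hp2, hmap⟩ := pvEnum_split requests pre suf p h
      have hidx : requests.idxOf p.2 = pre.length := by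
        apply pvIdxOf_first requests pre.length p.2 hn hp2.symm
        rwa [← hmap]
      apply ih (pre ++ [p]) _ (by rw [hassoc] at h; exact h)
      intro w
      by_cases hw : w = p.2
      · subst hw
        rw [PySem.Dict.get?_insert_self]
        simp [hidx, hp1]
      · rw [PySem.Dict.get?_insert_of_ne _ _ hw, hd w]
        simp only [List.map_append, List.mem_append]
        have hiff : (w ∈ List.map (fun x => x.2) pre ∨ w ∈ List.map (fun x => x.2) [p]) ↔ w ∈ List.map (fun x => x.2) pre := by
          simp [hw]
        rw [if_congr hiff rfl rfl]

theorem pvA_eq_fill (servers : Int) (hs : 1 ≤ servers) (sticky : Bool) (requests : List Int) :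
    solution servers sticky requests =
      pvFill servers.toNat
        (if sticky then pvTargetS servers requests else pvTargetNS servers)
        (PySem.List.enumerate requests 0) := by
  cases sticky with
  | false =>
    show (PySem.List.enumerate requests 0).foldl _ _ = _
    have hfn : (fun (answer : List (List Int)) (iv : Int × Int) =>
        if (false == false) = true then pvAppendAt answer (PySem.Int.mod iv.1 servers) iv.2
        else match pvScanAppend answer iv.2 with
          | some a => a
          | none => pvAppendAt answer (PySem.Int.mod iv.1 servers) iv.2) =
        (fun answer iv => pvAppendAt answer (PySem.Int.mod iv.1 servers) iv.2) := by
      funext answer iv; simp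
    simp only [solution, hfn]
    rw [pvInit_eq servers (pvTargetNS servers)]
    exact pvFold_fill servers.toNat (pvTargetNS servers) _ _
      (fun pre p suf h => pvStepNS servers hs requests pre suf p h) [] _ rfl
  | true =>
    have hfn : (fun (answer : List (List Int)) (iv : Int × Int) =>
        if (true == false) = true then pvAppendAt answer (PySem.Int.mod iv.1 servers) iv.2
        else match pvScanAppend answer iv.2 with
          | some a => a
          | none => pvAppendAt answer (PySem.Int.mod iv.1 servers) iv.2) =
        (fun answer iv => match pvScanAppend answer iv.2 with
          | some a => a
          | none => pvAppendAt answer (PySem.Int.mod iv.1 servers) iv.2) := by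
      funext answer iv; simp
    simp only [solution, hfn]
    rw [pvInit_eq servers (pvTargetS servers requests)]
    exact pvFold_fill servers.toNat (pvTargetS servers requests) _ _
      (fun pre p suf h => pvStepS servers hs requests pre suf p h) [] _ rfl

theorem pvB_eq_fill (servers : Int) (hs : 1 ≤ servers) (sticky : Bool) (requests : List Int) :
    solution_alt servers sticky requests =
      pvFill servers.toNat
        (if sticky then pvTargetS servers requests else pvTargetNS servers)
        (PySem.List.enumerate requests 0) := by
  cases sticky with
  | false =>
    simp only [solution_alt, pvFill, show (false == false) = true from rfl, if_true,
      Bool.false_eq_true, if_false]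
    rw [PySem.List.pyRange_one, List.map_map]
    simp only [sub_zero, zero_add]
    apply List.map_congr_left
    intro k hk
    simp only [Function.comp]
    congr 1
    apply List.filter_congr
    intro iv hiv
    have h0 : 0 ≤ iv.1 := pvEnum_fst_nonneg requests iv hiv
    rw [← pvMod_cast servers iv.1 hs h0]
    simp [pvTargetNS]
    omega
  | true =>
    simp only [solution_alt, pvFill, show (true == false) = false from rfl,
      Bool.false_eq_true, if_false, if_true]
    rw [PySem.List.pyRange_one, List.map_map]
    simp only [sub_zero, zero_add]
    apply List.map_congr_left
    intro k hk
    simp only [Function.comp]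
    have hso := pvServerOf_inv servers requests (PySem.List.enumerate requests 0) []
      PySem.Dict.empty (by simp) (by intro v; simp [PySem.Dict.get?_empty])
    set dct := (PySem.List.enumerate requests 0).foldl
      (fun d iv => if d.contains iv.2 then d else d.insert iv.2 (PySem.Int.mod iv.1 servers))
      PySem.Dict.empty with hdct
    have hprop : ∀ v ∈ requests, dct.get? v =
        some (PySem.Int.mod ((requests.idxOf v : Nat) : Int) servers) := by
      intro v hv
      have hv' := hso v
      simp only [List.nil_append, PySem.List.map_snd_enumerate] at hv'
      rw [if_pos hv] at hv'
      exact hv'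
    conv_lhs => rw [← PySem.List.map_snd_enumerate requests 0]
    rw [List.filter_map]
    congr 1
    apply List.filter_congr
    intro iv hiv
    have hv : iv.2 ∈ requests := by
      have hm : iv.2 ∈ (PySem.List.enumerate requests 0).map (fun x => x.2) :=
        List.mem_map.2 ⟨iv, hiv, rfl⟩
      rwa [PySem.List.map_snd_enumerate] at hm
    simp only [Function.comp]
    rw [PySem.Dict.getD_eq_get?_getD, hprop iv.2 hv]
    simp only [Option.getD_some]
    rw [← pvMod_cast servers ((requests.idxOf iv.2 : Nat) : Int) hs (by positivity)]
    simp [pvTargetS]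
    omega

theorem pvEmpty_case (servers : Int) (sticky : Bool) :
    solution servers sticky [] = solution_alt servers sticky [] := by
  cases sticky <;>
    simp [solution, solution_alt, PySem.List.enumerate_nil]

-- ===== VERDICT (by name: the statement is the Claim_ definition above) =====
theorem solution_spec : Claim_equal_solution := by
  intro servers sticky requests hdom hpre
  unfold Spec_solution
  rcases hpre with hs | hreq
  · rw [pvA_eq_fill servers hs sticky requests, pvB_eq_fill servers hs sticky requests]
  · subst hreq; exact pvEmpty_case servers sticky
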